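-- pv_equiv track=rewrite | github.com/Aanuj55/Credit-Risk-Analysis | Statistical Summary.py | get_dict
-- ===== SOURCE A (Python) =====
-- count = 1000000//730
--
-- def get_dict(col_data):
--     '''
--        It provides necessary dictionary for frequency and
--        related labels
--     '''
--     lab_cnt = {}
--     for val in col_data:
--         if val in lab_cnt.keys():
--            lab_cnt[val] += 1
--         else:
--              lab_cnt[val] = 1
--
--     ct_list = list(lab_cnt.values())
--     ct_set = list(set(ct_list))
--     ct_set.sort(reverse = True)
--
--     dict1 = {}
--     for count in ct_set:
--         dict1[count] = []
--
--     for lab,count in lab_cnt.items():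
--           dict1[count].append(lab)
--     return (dict1.copy(),ct_set)
-- ===== SOURCE B (Python) =====
-- def get_dict(col_data):
--     lab_cnt = {}
--     for val in col_data:
--         lab_cnt[val] = lab_cnt.get(val, 0) + 1
--     dict1 = {}
--     for lab, cnt in sorted(lab_cnt.items(), key=lambda kv: -kv[1]):
--         dict1.setdefault(cnt, []).append(lab)
--     return (dict1, list(dict1.keys()))
-- ===== Notes on version B (the rewrite author's own statement) =====
-- stated objective: idiomatic
-- what changed: Replaces A's set-of-counts + pre-initialised-keys + scatter loop by a single stable sort of the (label,count) items by descending count and one grouping pass over the sorted items; the dict keys then come out already in descending order, so no separate count-set is built.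
import Mathlib
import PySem

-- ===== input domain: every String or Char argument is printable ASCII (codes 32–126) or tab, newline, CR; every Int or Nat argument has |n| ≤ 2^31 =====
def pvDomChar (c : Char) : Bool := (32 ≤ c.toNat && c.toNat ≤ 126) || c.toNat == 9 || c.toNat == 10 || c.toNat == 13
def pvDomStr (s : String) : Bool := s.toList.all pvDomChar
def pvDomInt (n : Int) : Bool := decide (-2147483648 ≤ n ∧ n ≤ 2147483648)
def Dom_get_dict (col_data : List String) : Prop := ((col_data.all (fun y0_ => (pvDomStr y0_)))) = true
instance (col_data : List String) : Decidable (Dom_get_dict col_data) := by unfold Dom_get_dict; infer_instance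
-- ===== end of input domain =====

-- B groups the (label, count) items by one stable descending-by-count sort instead of
-- A's set-of-counts + pre-initialised-keys + scatter loop; the return values are proved equal.

-- ===== PORT A =====
-- literal port of A; `dict1[count].append(lab)` is `modify p.2 [] (· ++ [p.1])` — exact here
-- because every count in lab_cnt.items is a key of dict1 (so Python's lookup never raises).
def get_dict (col_data : List String) : (List (Int × List String)) × List Int :=
  let lab_cnt : PySem.Dict String Int :=
    col_data.foldl (fun d val =>
      if d.contains val then d.modify val 0 (· + 1) else d.insert val 1) PySem.Dict.empty
  let ct_list : List Int := lab_cnt.values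
  let ct_set : List Int := PySem.List.sorted (PySem.Set.ofList ct_list) (fun x => x) true
  let dict1 : PySem.Dict Int (List String) :=
    ct_set.foldl (fun d c => d.insert c ([] : List String)) PySem.Dict.empty
  let dict2 : PySem.Dict Int (List String) :=
    lab_cnt.items.foldl (fun d p => d.modify p.2 [] (fun v => v ++ [p.1])) dict1
  (dict2.items, ct_set)

-- ===== PORT B =====
-- port of Source B: count, then one stable sort of the items by descending count,
-- then one grouping pass `dict1.setdefault(cnt, []).append(lab)`
def get_dict_alt (col_data : List String) : (List (Int × List String)) × List Int :=
  let lab_cnt : PySem.Dict String Int :=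
    col_data.foldl (fun d val => d.insert val (d.getD val 0 + 1)) PySem.Dict.empty
  let dict1 : PySem.Dict Int (List String) :=
    (PySem.List.sorted lab_cnt.items (fun kv => -kv.2) false).foldl
      (fun d p => (d.setdefault p.2 ([] : List String)).modify p.2 [] (fun v => v ++ [p.1])) PySem.Dict.empty
  (dict1.items, dict1.keys)

-- ===== PRECONDITION & SPEC =====
def Spec_get_dict (col_data : List String) (out : (List (Int × List String)) × List Int) : Prop := out = get_dict_alt col_data
instance (col_data : List String) (out : (List (Int × List String)) × List Int) : Decidable (Spec_get_dict col_data out) := by unfold Spec_get_dict; infer_instance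

-- ===== CLAIM (what is proved, stated in full; the proofs are below) =====
def Claim_equal_get_dict : Prop := ∀ (col_data : List String), Dom_get_dict col_data → Spec_get_dict col_data (get_dict col_data)

-- ===== LEMMAS AND PROOFS =====


theorem pv_insertBy_front {α : Type} (bef : α → α → Bool) (x : α) (ys : List α)
    (h : ∀ y ∈ ys, bef x y = true) :
    PySem.List.insertBy bef x ys = x :: ys := by
  cases ys with
  | nil => rfl
  | cons y t => simp [PySem.List.insertBy, h y (by simp)]

theorem pv_insertBy_skip {α : Type} (bef : α → α → Bool) (x : α) (ys₁ ys₂ : List α)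
    (h : ∀ y ∈ ys₁, bef x y = false) :
    PySem.List.insertBy bef x (ys₁ ++ ys₂) = ys₁ ++ PySem.List.insertBy bef x ys₂ := by
  induction ys₁ with
  | nil => simp
  | cons y t ih =>
      have hy := h y (by simp)
      simp [PySem.List.insertBy, hy]
      exact ih (fun z hz => h z (by simp [hz]))

theorem pv_split_mem (C : List Int) (c0 : Int) (hp : C.Pairwise (· > ·)) (hm : c0 ∈ C) :
    C = C.filter (fun c => decide (c0 < c)) ++ c0 :: C.filter (fun c => decide (c < c0)) := by
  induction C with
  | nil => simp at hm
  | cons c t ih =>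
      rcases List.pairwise_cons.mp hp with ⟨hc, ht⟩
      by_cases hcc : c = c0
      · subst hcc
        have h1 : t.filter (fun c' => decide (c < c')) = [] := by
          apply List.filter_eq_nil_iff.mpr
          intro a ha; simpa using not_lt.mpr (le_of_lt (hc a ha))
        have h2 : t.filter (fun c' => decide (c' < c)) = t := by
          apply List.filter_eq_self.mpr
          intro a ha; simpa using hc a ha
        simp [h1, h2]
      · have hmt : c0 ∈ t := by
          rcases List.mem_cons.mp hm with h | h
          · exact absurd h.symm hcc
          · exact h
        have hlt : c0 < c := hc c0 hmt
        have := ih ht hmt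
        simp only [List.filter_cons, decide_eq_true_eq]
        rw [if_pos hlt, if_neg (by simpa using not_lt.mpr (le_of_lt hlt))]
        simpa using this

theorem pv_split_not_mem (C : List Int) (c0 : Int) (hp : C.Pairwise (· > ·)) (hm : c0 ∉ C) :
    C = C.filter (fun c => decide (c0 < c)) ++ C.filter (fun c => decide (c < c0)) := by
  induction C with
  | nil => simp
  | cons c t ih =>
      rcases List.pairwise_cons.mp hp with ⟨hc, ht⟩
      have hne : c ≠ c0 := fun h => hm (by simp [h])
      have hmt : c0 ∉ t := fun h => hm (by simp [h])
      rcases lt_or_gt_of_ne hne with h | h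
      · -- c < c0
        have h1 : List.filter (fun c' => decide (c0 < c')) (c :: t) = [] := by
          apply List.filter_eq_nil_iff.mpr
          intro a ha; rcases List.mem_cons.mp ha with rfl | ha'
          · simpa using not_lt.mpr (le_of_lt h)
          · simpa using not_lt.mpr (le_of_lt (lt_trans (hc a ha') h))
        have h2 : List.filter (fun c' => decide (c' < c0)) (c :: t) = c :: t := by
          apply List.filter_eq_self.mpr
          intro a ha; rcases List.mem_cons.mp ha with rfl | ha'
          · simpa using h
          · simpa using lt_trans (hc a ha') h
        rw [h1, h2]; rfl
      · -- c0 < c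
        have := ih ht hmt
        simp only [List.filter_cons, decide_eq_true_eq]
        rw [if_pos h, if_neg (by simpa using not_lt.mpr (le_of_lt h))]
        simpa using this


def pvDesc (P : List (String × Int)) : List Int :=
  PySem.List.sorted (PySem.Set.ofList (P.map (·.2))) (fun x => x) true

def pvGrp (P : List (String × Int)) (c : Int) : List (String × Int) :=
  P.filter (fun p => p.2 == c)

theorem pv_grp_snd {P : List (String × Int)} {c : Int} {y : String × Int}
    (h : y ∈ pvGrp P c) : y.2 = c := by
  have := List.of_mem_filter h
  simpa using this

theorem pv_mem_flatMap_grp {P : List (String × Int)} {F : List Int} {y : String × Int}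
    (h : y ∈ F.flatMap (pvGrp P)) : y.2 ∈ F := by
  rcases List.mem_flatMap.mp h with ⟨c, hc, hy⟩
  rwa [pv_grp_snd hy]

theorem pv_grp_append (P : List (String × Int)) (x : String × Int) (c : Int) :
    pvGrp (P ++ [x]) c = pvGrp P c ++ if x.2 = c then [x] else [] := by
  unfold pvGrp
  rw [List.filter_append]
  congr 1
  by_cases h : x.2 = c <;> simp [h]

theorem pv_ofList_add (V : List Int) (c0 : Int) :
    PySem.Set.ofList (V ++ [c0]) = PySem.Set.add (PySem.Set.ofList V) c0 := by
  unfold PySem.Set.ofList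
  rw [List.foldl_append]
  rfl

theorem pv_ofList_append_singleton_mem {V : List Int} {c0 : Int} (h : c0 ∈ V) :
    PySem.Set.ofList (V ++ [c0]) = PySem.Set.ofList V := by
  rw [pv_ofList_add]
  unfold PySem.Set.add
  rw [if_pos]
  simp only [PySem.Set.contains_eq_listContains, List.contains_eq_mem, decide_eq_true_eq]
  exact (PySem.Set.mem_ofList V c0).mpr h

theorem pv_ofList_append_singleton_not_mem {V : List Int} {c0 : Int} (h : c0 ∉ V) :
    PySem.Set.ofList (V ++ [c0]) = PySem.Set.ofList V ++ [c0] := by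
  rw [pv_ofList_add]
  unfold PySem.Set.add
  rw [if_neg]
  simp only [PySem.Set.contains_eq_listContains, List.contains_eq_mem, decide_eq_true_eq]
  rw [PySem.Set.mem_ofList]
  exact h

theorem pv_pairwise_gt_desc (P : List (String × Int)) : (pvDesc P).Pairwise (· > ·) := by
  have hge := PySem.List.sorted_pairwise_rev (PySem.Set.ofList (P.map (·.2))) (fun x => x)
  have hnd : (pvDesc P).Nodup := by
    unfold pvDesc
    exact ((PySem.List.sorted_perm (PySem.Set.ofList (P.map (·.2))) (fun x => x) true).symm.nodup
      (PySem.Set.nodup_ofList _))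
  exact (hnd.and hge).imp (fun h => lt_of_le_of_ne h.2 (Ne.symm h.1))

theorem pv_mem_desc (P : List (String × Int)) (c : Int) : c ∈ pvDesc P ↔ c ∈ P.map (·.2) := by
  unfold pvDesc
  rw [PySem.List.mem_sorted, PySem.Set.mem_ofList]

theorem pv_sorted_groups (P : List (String × Int)) :
    PySem.List.sorted P (fun kv => -kv.2) false = (pvDesc P).flatMap (pvGrp P) := by
  induction P using List.reverseRecOn with
  | nil => rfl
  | append_singleton P x ih =>
    rw [PySem.List.sorted_eq_foldl_insertBy, List.foldl_append,
        ← PySem.List.sorted_eq_foldl_insertBy, ih]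
    simp only [List.foldl_cons, List.foldl_nil]
    set bef : (String × Int) → (String × Int) → Bool :=
      fun a b => decide ((fun kv : String × Int => -kv.2) a < (fun kv : String × Int => -kv.2) b) with hbef
    set C := pvDesc P with hC
    set c0 := x.2 with hc0
    have hgt : C.Pairwise (· > ·) := pv_pairwise_gt_desc P
    set Fg : List Int := C.filter (fun c => decide (c0 < c)) with hFg
    set Fl : List Int := C.filter (fun c => decide (c < c0)) with hFl
    have hFg_mem : ∀ c ∈ Fg, c0 < c := fun c hc => by
      have := List.of_mem_filter hc; simpa using this
    have hFl_mem : ∀ c ∈ Fl, c < c0 := fun c hc => by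
      have := List.of_mem_filter hc; simpa using this
    have hbef_false : ∀ y : String × Int, c0 ≤ y.2 → bef x y = false := by
      intro y hy
      simp only [hbef, decide_eq_false_iff_not, not_lt, ← hc0]
      omega
    have hbef_true : ∀ y : String × Int, y.2 < c0 → bef x y = true := by
      intro y hy
      simp only [hbef, decide_eq_true_eq, ← hc0]
      omega
    -- groups over (P ++ [x])
    have hgrp_ne : ∀ c ∈ C, c ≠ c0 → pvGrp (P ++ [x]) c = pvGrp P c := by
      intro c _ hne
      rw [pv_grp_append, if_neg (by omega), List.append_nil]
    by_cases hm : c0 ∈ C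
    · -- count already present
      have hCnew : pvDesc (P ++ [x]) = C := by
        unfold pvDesc
        rw [List.map_append]
        simp only [List.map_cons, List.map_nil]
        rw [pv_ofList_append_singleton_mem (by simpa using (pv_mem_desc P c0).mp hm)]
        rfl
      have hsplit := pv_split_mem C c0 hgt hm
      rw [hCnew]
      conv_lhs => rw [hsplit]
      conv_rhs => rw [hsplit]
      rw [List.flatMap_append, List.flatMap_cons, List.flatMap_append, List.flatMap_cons]
      have e1 : Fg.flatMap (pvGrp (P ++ [x])) = Fg.flatMap (pvGrp P) :=
        List.flatMap_congr (fun c hc => hgrp_ne c (List.mem_of_mem_filter hc) (by have := hFg_mem c hc; omega))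
      have e2 : Fl.flatMap (pvGrp (P ++ [x])) = Fl.flatMap (pvGrp P) :=
        List.flatMap_congr (fun c hc => hgrp_ne c (List.mem_of_mem_filter hc) (by have := hFl_mem c hc; omega))
      have e3 : pvGrp (P ++ [x]) c0 = pvGrp P c0 ++ [x] := by
        rw [pv_grp_append, if_pos rfl]
      rw [e1, e2, e3]
      rw [← List.append_assoc]
      rw [pv_insertBy_skip bef x (Fg.flatMap (pvGrp P) ++ pvGrp P c0) (Fl.flatMap (pvGrp P))]
      · rw [pv_insertBy_front bef x (Fl.flatMap (pvGrp P))]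
        · simp
        · intro y hy
          exact hbef_true y (hFl_mem _ (pv_mem_flatMap_grp hy))
      · intro y hy
        rcases List.mem_append.mp hy with h | h
        · exact hbef_false y (le_of_lt (hFg_mem _ (pv_mem_flatMap_grp h)))
        · exact hbef_false y (le_of_eq (pv_grp_snd h).symm)
    · -- new count
      have hmv : c0 ∉ P.map (·.2) := fun h => hm ((pv_mem_desc P c0).mpr h)
      have hCnew : pvDesc (P ++ [x]) = Fg ++ c0 :: Fl := by
        unfold pvDesc
        rw [List.map_append]
        simp only [List.map_cons, List.map_nil]
        rw [pv_ofList_append_singleton_not_mem (by simpa using hmv)]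
        apply PySem.List.sorted_rev_eq_of_perm_of_pairwise_gt
        · have h1 : (Fg ++ c0 :: Fl).Perm (c0 :: (Fg ++ Fl)) := List.perm_middle
          have h2 : (Fg ++ Fl) = C := (pv_split_not_mem C c0 hgt hm).symm
          refine h1.trans ?_
          rw [h2]
          have h3 : (c0 :: C).Perm (C ++ [c0]) := (List.perm_append_singleton c0 C).symm
          refine h3.trans ?_
          exact (PySem.List.sorted_perm _ _ _).append_right [c0]
        · rw [List.pairwise_append]
          refine ⟨hgt.sublist (List.filter_sublist), ?_, ?_⟩
          · rw [List.pairwise_cons]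
            exact ⟨fun c hc => hFl_mem c hc, hgt.sublist (List.filter_sublist)⟩
          · intro a ha b hb
            rcases List.mem_cons.mp hb with rfl | hb'
            · exact hFg_mem a ha
            · exact lt_trans (hFl_mem b hb') (hFg_mem a ha)
      have hsplit := pv_split_not_mem C c0 hgt hm
      rw [hCnew]
      conv_lhs => rw [hsplit]
      rw [List.flatMap_append, List.flatMap_append, List.flatMap_cons]
      have e1 : Fg.flatMap (pvGrp (P ++ [x])) = Fg.flatMap (pvGrp P) :=
        List.flatMap_congr (fun c hc => hgrp_ne c (List.mem_of_mem_filter hc) (by have := hFg_mem c hc; omega))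
      have e2 : Fl.flatMap (pvGrp (P ++ [x])) = Fl.flatMap (pvGrp P) :=
        List.flatMap_congr (fun c hc => hgrp_ne c (List.mem_of_mem_filter hc) (by have := hFl_mem c hc; omega))
      have e3 : pvGrp (P ++ [x]) c0 = [x] := by
        rw [pv_grp_append, if_pos rfl]
        have : pvGrp P c0 = [] := by
          apply List.filter_eq_nil_iff.mpr
          intro p hp
          simp only [beq_iff_eq]
          intro hpc
          exact hmv (by rw [← hpc]; exact List.mem_map_of_mem hp)
        rw [this, List.nil_append]
      rw [e1, e2, e3]
      rw [pv_insertBy_skip bef x (Fg.flatMap (pvGrp P)) (Fl.flatMap (pvGrp P))]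
      · rw [pv_insertBy_front bef x (Fl.flatMap (pvGrp P))]
        · simp
        · intro y hy
          exact hbef_true y (hFl_mem _ (pv_mem_flatMap_grp hy))
      · intro y hy
        exact hbef_false y (le_of_lt (hFg_mem _ (pv_mem_flatMap_grp hy)))

theorem pv_countA (col : List String) :
    col.foldl (fun d val =>
      if d.contains val then d.modify val 0 (· + 1) else d.insert val 1) PySem.Dict.empty
      = PySem.Dict.counter col := by
  have hstep : (fun (d : PySem.Dict String Int) val =>
      if d.contains val then d.modify val 0 (· + 1) else d.insert val 1)
      = (fun (d : PySem.Dict String Int) val => d.modify val 0 (· + 1)) := by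
    funext d val
    by_cases h : d.contains val = true
    · simp [h]
    · have h' : d.contains val = false := by simpa using h
      simp only [h', Bool.false_eq_true, if_false]
      unfold PySem.Dict.modify
      rw [PySem.Dict.getD_of_not_contains d 0 h']
      norm_num
  rw [hstep]
  rfl

theorem pv_update_self (xs : List Int) (s : PySem.Set Int) (h : ∀ v ∈ xs, v ∈ s) :
    PySem.Set.update s xs = s := by
  induction xs generalizing s with
  | nil => rfl
  | cons v t ih =>
      show List.foldl PySem.Set.add (PySem.Set.add s v) t = s
      have hadd : PySem.Set.add s v = s := by
        unfold PySem.Set.add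
        rw [if_pos]
        simp only [PySem.Set.contains_eq_listContains, List.contains_eq_mem, decide_eq_true_eq]
        exact h v (by simp)
      rw [hadd]
      exact ih s (fun w hw => h w (by simp [hw]))

theorem pv_foldl_add_const (bl : List Int) (c : Int) (s : PySem.Set Int)
    (hbl : ∀ y ∈ bl, y = c) (hcs : c ∈ s) : List.foldl PySem.Set.add s bl = s := by
  induction bl with
  | nil => rfl
  | cons y t ih =>
      rw [List.foldl_cons]
      have hy : y = c := hbl y (by simp)
      have hadd : PySem.Set.add s y = s := by
        rw [hy]
        unfold PySem.Set.add
        rw [if_pos]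
        simp only [PySem.Set.contains_eq_listContains, List.contains_eq_mem, decide_eq_true_eq]
        exact hcs
      rw [hadd]
      exact ih (fun z hz => hbl z (by simp [hz]))

theorem pv_ofList_blocks (C : List Int) (g : Int → List Int) (s : PySem.Set Int)
    (hnd : C.Nodup) (hs : ∀ c ∈ C, c ∉ s)
    (hg : ∀ c ∈ C, g c ≠ [] ∧ ∀ y ∈ g c, y = c) :
    List.foldl PySem.Set.add s (C.flatMap g) = s ++ C := by
  induction C generalizing s with
  | nil => simp
  | cons c t ih =>
      rw [List.flatMap_cons, List.foldl_append]
      obtain ⟨hne, hcc⟩ := hg c (by simp)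
      have hblock : List.foldl PySem.Set.add s (g c) = s ++ [c] := by
        cases hgc : g c with
        | nil => exact absurd hgc hne
        | cons y ys =>
            have hy : y = c := hcc y (by rw [hgc]; simp)
            rw [List.foldl_cons]
            have hadd : PySem.Set.add s y = s ++ [c] := by
              rw [hy]
              unfold PySem.Set.add
              rw [if_neg]
              simp only [PySem.Set.contains_eq_listContains, List.contains_eq_mem,
                decide_eq_true_eq]
              exact hs c (by simp)
            rw [hadd]
            exact pv_foldl_add_const ys c (s ++ [c])
              (fun z hz => hcc z (by rw [hgc]; simp [hz])) (by simp)
      rw [hblock]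
      rw [ih (s ++ [c]) (List.nodup_cons.mp hnd).2
        (fun c' hc' => by
          simp only [List.mem_append, List.mem_singleton]
          rintro (h | rfl)
          · exact hs c' (by simp [hc']) h
          · exact (List.nodup_cons.mp hnd).1 hc')
        (fun c' hc' => hg c' (by simp [hc']))]
      rw [List.append_assoc]
      rfl

theorem pv_filter_flatMap_grp (L : List (String × Int)) (C : List Int) (c : Int)
    (hnd : C.Nodup) (hc : c ∈ C) :
    (C.flatMap (pvGrp L)).filter (fun p => p.2 == c) = pvGrp L c := by
  induction C with
  | nil => cases hc
  | cons c' t ih =>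
      rw [List.flatMap_cons, List.filter_append]
      rcases List.nodup_cons.mp hnd with ⟨hct, hndt⟩
      by_cases h : c' = c
      · subst h
        have h1 : (pvGrp L c').filter (fun p => p.2 == c') = pvGrp L c' :=
          List.filter_eq_self.mpr (fun p hp => by simp [pv_grp_snd hp])
        have h2 : (t.flatMap (pvGrp L)).filter (fun p => p.2 == c') = [] := by
          apply List.filter_eq_nil_iff.mpr
          intro p hp
          have : p.2 ∈ t := pv_mem_flatMap_grp hp
          simp only [beq_iff_eq]
          intro he
          exact hct (he ▸ this)
        rw [h1, h2, List.append_nil]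
      · have hct' : c ∈ t := by
          rcases List.mem_cons.mp hc with h' | h'
          · exact absurd h'.symm h
          · exact h'
        have h1 : (pvGrp L c').filter (fun p => p.2 == c) = [] := by
          apply List.filter_eq_nil_iff.mpr
          intro p hp
          simp only [beq_iff_eq]
          rw [pv_grp_snd hp]
          exact h
        rw [h1, ih hndt hct', List.nil_append]

theorem pv_nodup_desc (P : List (String × Int)) : (pvDesc P).Nodup :=
  (pv_pairwise_gt_desc P).imp (fun h => ne_of_gt h)

theorem pv_swap_pred (c : Int) :
    ((fun (p : Int × String) => p.1 == c) ∘ Prod.swap) = (fun (p : String × Int) => p.2 == c) := rfl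

theorem pv_swap_proj :
    ((fun (x : Int × String) => x.2) ∘ Prod.swap) = (fun (x : String × Int) => x.1) := rfl

theorem pv_scatter_items (L : List (String × Int)) :
    (L.foldl (fun d p => d.modify p.2 [] (fun v => v ++ [p.1]))
       ((pvDesc L).foldl (fun d c => d.insert c ([] : List String)) PySem.Dict.empty)).items
      = (pvDesc L).map (fun c => (c, (pvGrp L c).map (·.1))) := by
  set C := pvDesc L with hC
  set dict0 := C.foldl (fun d c => d.insert c ([] : List String)) PySem.Dict.empty with hd0
  have hC_nd : C.Nodup := pv_nodup_desc L
  have h0items : dict0.items = C.map (fun c => (c, ([] : List String))) := by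
    rw [hd0]
    have h := PySem.Dict.items_foldl_insert_fresh C (fun c => c) (fun _ => ([] : List String))
      PySem.Dict.empty (fun a _ => by simp) (by simpa using hC_nd)
    simpa using h
  have h0keys : dict0.keys = C := by
    simp [PySem.Dict.keys, h0items, Function.comp_def]
  have h0keys_nd : dict0.keys.Nodup := by rw [h0keys]; exact hC_nd
  set dict2 := L.foldl (fun d p => d.modify p.2 [] (fun v => v ++ [p.1])) dict0 with hd2
  have hkeys2 : dict2.keys = C := by
    rw [hd2]
    have hk := PySem.Dict.keys_foldl_modify_key L (fun p : String × Int => p.2)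
      ([] : List String) (fun _ p => (· ++ [p.1])) dict0
    rw [hk, h0keys]
    exact pv_update_self _ C (fun v hv => (pv_mem_desc L v).mpr hv)
  have hkeys2_nd : dict2.keys.Nodup := by rw [hkeys2]; exact hC_nd
  have hitems2 : dict2.items = C.map (fun c => (c, dict2.getD c [])) := by
    have h := PySem.Dict.items_eq_map_keys dict2 hkeys2_nd ([] : List String)
    rw [hkeys2] at h
    exact h
  rw [hitems2]
  apply List.map_congr_left
  intro c hcC
  have hsw : dict2 = (L.map Prod.swap).foldl
      (fun d q => d.modify q.1 [] (fun v => v ++ [q.2])) dict0 := by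
    rw [List.foldl_map]
    rfl
  have h0getD : dict0.getD c [] = [] :=
    PySem.Dict.getD_of_mem_items dict0 (by rw [h0items]; exact List.mem_map_of_mem hcC) h0keys_nd []
  have hgetD : dict2.getD c [] = (pvGrp L c).map (·.1) := by
    rw [hsw, PySem.Dict.getD_foldl_modify_append (L.map Prod.swap) dict0 c, h0getD,
      List.nil_append, List.filter_map, List.map_map, pv_swap_pred, pv_swap_proj]
    rfl
  rw [hgetD]

theorem pv_group_items (L : List (String × Int)) :
    ((PySem.List.sorted L (fun kv => -kv.2) false).foldl
       (fun d p => (d.setdefault p.2 ([] : List String)).modify p.2 [] (fun v => v ++ [p.1])) PySem.Dict.empty).items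
      = (pvDesc L).map (fun c => (c, (pvGrp L c).map (·.1))) := by
  set C := pvDesc L with hC
  have hC_nd : C.Nodup := pv_nodup_desc L
  have hstep : (fun (d : PySem.Dict Int (List String)) (p : String × Int) =>
      (d.setdefault p.2 ([] : List String)).modify p.2 [] (fun v => v ++ [p.1]))
      = (fun d p => d.modify p.2 [] (fun v => v ++ [p.1])) := by
    funext d p
    by_cases h : d.contains p.2 = true
    · rw [PySem.Dict.setdefault_of_contains d ([] : List String) h]
    · have h' : d.contains p.2 = false := by simpa using h
      rw [PySem.Dict.setdefault_of_not_contains d ([] : List String) h']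
      show (d.insert p.2 []).insert p.2 ((d.insert p.2 []).getD p.2 [] ++ [p.1])
          = d.insert p.2 ((d.getD p.2 []) ++ [p.1])
      rw [PySem.Dict.getD_insert_self, PySem.Dict.insert_insert_self,
        PySem.Dict.getD_of_not_contains d ([] : List String) h']
  rw [hstep, pv_sorted_groups L]
  set R := C.flatMap (pvGrp L) with hR
  set dictB := R.foldl (fun d p => d.modify p.2 [] (fun v => v ++ [p.1])) PySem.Dict.empty with hdB
  have hgblocks : ∀ c ∈ C, ((pvGrp L c).map (fun p : String × Int => p.2)) ≠ [] ∧
      ∀ y ∈ (pvGrp L c).map (fun p : String × Int => p.2), y = c := by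
    intro c hc
    constructor
    · rcases List.mem_map.mp ((pv_mem_desc L c).mp hc) with ⟨p, hp, hpc⟩
      have hpg : p ∈ pvGrp L c := by
        unfold pvGrp
        exact List.mem_filter.mpr ⟨hp, by simp [hpc]⟩
      exact fun h => by simpa [h] using List.mem_map_of_mem (f := fun p : String × Int => p.2) hpg
    · intro y hy
      rcases List.mem_map.mp hy with ⟨p, hp, hpy⟩
      rw [← hpy]
      exact pv_grp_snd hp
  have hkeys : dictB.keys = C := by
    rw [hdB]
    have hk := PySem.Dict.keys_foldl_modify_key R (fun p : String × Int => p.2)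
      ([] : List String) (fun _ p => (· ++ [p.1])) PySem.Dict.empty
    rw [hk]
    have hkeys_empty : (PySem.Dict.empty : PySem.Dict Int (List String)).keys = [] := rfl
    rw [hkeys_empty]
    show List.foldl PySem.Set.add [] (R.map (fun p => p.2)) = C
    rw [hR, List.map_flatMap]
    have h := pv_ofList_blocks C (fun c => (pvGrp L c).map (fun p : String × Int => p.2)) []
      hC_nd (by simp) hgblocks
    simpa using h
  have hkeys_nd : dictB.keys.Nodup := by rw [hkeys]; exact hC_nd
  have hitems : dictB.items = C.map (fun c => (c, dictB.getD c [])) := by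
    have h := PySem.Dict.items_eq_map_keys dictB hkeys_nd ([] : List String)
    rw [hkeys] at h
    exact h
  rw [hitems]
  apply List.map_congr_left
  intro c hcC
  have hsw : dictB = (R.map Prod.swap).foldl
      (fun d q => d.modify q.1 [] (fun v => v ++ [q.2])) PySem.Dict.empty := by
    rw [List.foldl_map]
    rfl
  have hgetD : dictB.getD c [] = (pvGrp L c).map (·.1) := by
    rw [hsw, PySem.Dict.getD_foldl_modify_append (R.map Prod.swap) PySem.Dict.empty c]
    have hemp : (PySem.Dict.empty : PySem.Dict Int (List String)).getD c [] = [] := rfl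
    rw [hemp, List.nil_append, List.filter_map, List.map_map, pv_swap_pred, pv_swap_proj]
    show List.map (fun x : String × Int => x.1) (R.filter (fun p => p.2 == c)) = _
    rw [hR, pv_filter_flatMap_grp L C c hC_nd hcC]
  rw [hgetD]

theorem get_dict_eq (col : List String) : get_dict col = get_dict_alt col := by
  unfold get_dict get_dict_alt
  rw [pv_countA col, PySem.Dict.foldl_insert_getD_add_one_eq_counter]
  dsimp only
  set L := (PySem.Dict.counter col).items with hL
  have hdesc : PySem.List.sorted (PySem.Set.ofList (PySem.Dict.counter col).values)
      (fun x => x) true = pvDesc L := rfl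
  rw [hdesc]
  apply Prod.ext
  · show (L.foldl (fun d p => d.modify p.2 [] (fun v => v ++ [p.1]))
       ((pvDesc L).foldl (fun d c => d.insert c ([] : List String)) PySem.Dict.empty)).items = _
    rw [pv_scatter_items L, ← pv_group_items L]
  · show pvDesc L = _
    have h := pv_group_items L
    show pvDesc L = (((PySem.List.sorted L (fun kv => -kv.2) false).foldl
       (fun d p => (d.setdefault p.2 ([] : List String)).modify p.2 [] (fun v => v ++ [p.1])) PySem.Dict.empty)).items.map (·.1)
    rw [h, List.map_map]
    simp [Function.comp_def]

-- ===== VERDICT (by name: the statement is the Claim_ definition above) =====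
theorem get_dict_spec : Claim_equal_get_dict := by
  intro col _
  show get_dict col = get_dict_alt col
  exact get_dict_eq col
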